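-- pv_equiv track=rewrite | github.com/lromeros/wallbreakers2019 | week2/most-common-word.py | clean_paragraph
-- ===== SOURCE A (Python) =====
-- def clean_paragraph(paragraph, banned):
--     clean = []
--     breaks = ["!", "?", "'", ",", ";", ".", " "]
--     word = ''
--     for c in paragraph:
--         if c not in breaks:
--             word += c.lower()
--         else:
--             if word not in banned:
--                 if len(word) > 0:
--                     clean.append(word)
--             word = ''
--     if len(word) > 0 and word not in banned:
--         clean.append(word)
--
--     return clean
-- ===== SOURCE B (Python) =====
-- def clean_paragraph(paragraph, banned):
--     words = paragraph.lower().translate(str.maketrans("!?',;.", "      ")).split(" ")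
--     return [w for w in words if w and w not in banned]
-- ===== Notes on version B (the rewrite author's own statement) =====
-- stated objective: faster
-- what changed: Replaces A's char-by-char Python state machine (manual word accumulator, per-character lowercasing and break tests) by a pipeline of C-implemented string methods: lowercase the whole string, translate the six punctuation break characters to spaces, split on spaces, filter out empty and banned words with a comprehension.
import Mathlib
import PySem

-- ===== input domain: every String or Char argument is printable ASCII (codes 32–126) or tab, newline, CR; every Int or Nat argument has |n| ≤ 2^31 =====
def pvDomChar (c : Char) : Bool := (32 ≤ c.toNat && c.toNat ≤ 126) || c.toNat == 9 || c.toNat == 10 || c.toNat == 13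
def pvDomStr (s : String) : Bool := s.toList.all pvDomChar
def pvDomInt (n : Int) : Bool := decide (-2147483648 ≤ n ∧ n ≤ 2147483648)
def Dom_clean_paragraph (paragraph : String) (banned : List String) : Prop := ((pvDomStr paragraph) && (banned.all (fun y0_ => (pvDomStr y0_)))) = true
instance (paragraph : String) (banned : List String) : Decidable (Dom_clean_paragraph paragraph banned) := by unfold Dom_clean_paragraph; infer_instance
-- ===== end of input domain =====

-- ===== PORT A =====
-- B tokenizes by lower+translate+split+filter (C-level str methods) instead of A's char-by-char
-- accumulator loop; return values proved equal on Dom (timing run measured B faster by a constant factor).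
def clean_paragraph (paragraph : String) (banned : List String) : List String :=
  -- breaks = ["!", "?", "'", ",", ";", ".", " "]
  let breaks : List Char := ['!', '?', '\'', ',', ';', '.', ' ']
  -- for c in paragraph: state = (clean, word)
  let st := paragraph.toList.foldl (fun (st : List String × List Char) c =>
    if c ∉ breaks then
      (st.1, st.2 ++ PySem.Chars.lower [c])        -- word += c.lower()
    else
      (if String.ofList st.2 ∉ banned then
         (if st.2.length > 0 then st.1 ++ [String.ofList st.2] else st.1)
       else st.1, [])) ([], [])
  -- if len(word) > 0 and word not in banned: clean.append(word)
  if st.2.length > 0 ∧ String.ofList st.2 ∉ banned then st.1 ++ [String.ofList st.2] else st.1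

-- ===== PORT B =====
-- str.translate with a table sending the six punctuation breaks to ' ' = a map over the chars (exact:
-- maketrans("!?',;.", "      ") maps exactly those six chars, leaves every other char unchanged).
def pvTable (c : Char) : Char :=
  if c ∈ (['!', '?', '\'', ',', ';', '.'] : List Char) then ' ' else c

def clean_paragraph_alt (paragraph : String) (banned : List String) : List String :=
  -- words = paragraph.lower().translate(...).split(" ")
  let words := PySem.Chars.splitOn ((PySem.Chars.lower paragraph.toList).map pvTable) [' ']
  -- [w for w in words if w and w not in banned]
  ((words.filter (fun w => w ≠ [] ∧ String.ofList w ∉ banned)).map String.ofList)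

-- ===== PRECONDITION & SPEC =====
def Spec_clean_paragraph (paragraph : String) (banned : List String) (out : List String) : Prop := out = clean_paragraph_alt paragraph banned
instance (paragraph : String) (banned : List String) (out : List String) : Decidable (Spec_clean_paragraph paragraph banned out) := by unfold Spec_clean_paragraph; infer_instance

-- ===== CLAIM (what is proved, stated in full; the proofs are below) =====
def Claim_equal_clean_paragraph : Prop := ∀ (paragraph : String) (banned : List String), Dom_clean_paragraph paragraph banned → Spec_clean_paragraph paragraph banned (clean_paragraph paragraph banned)

-- ===== LEMMAS AND PROOFS =====

-- proof-only helpers: a direct recursive single-char splitter, and named copies of A's loop step/finish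
def pvSplit (pre : List Char) : List Char → List (List Char)
  | [] => [pre]
  | c :: rest => if c = ' ' then pre :: pvSplit [] rest else pvSplit (pre ++ [c]) rest

def pvF (c : Char) : Char := pvTable (PySem.Chars.lowerChar c)

def pvBreaks : List Char := ['!', '?', '\'', ',', ';', '.', ' ']

def pvStep (banned : List String) (st : List String × List Char) (c : Char) : List String × List Char :=
  if c ∉ pvBreaks then (st.1, st.2 ++ PySem.Chars.lower [c])
  else (if String.ofList st.2 ∉ banned then
          (if st.2.length > 0 then st.1 ++ [String.ofList st.2] else st.1)
        else st.1, [])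

def pvFinish (banned : List String) (st : List String × List Char) : List String :=
  if st.2.length > 0 ∧ String.ofList st.2 ∉ banned then st.1 ++ [String.ofList st.2] else st.1

lemma pvA_eq (p : String) (b : List String) :
    clean_paragraph p b = pvFinish b (p.toList.foldl (pvStep b) ([], [])) := rfl

lemma pvF_of_break {c : Char} (h : c ∈ pvBreaks) : pvF c = ' ' := by
  fin_cases h <;> decide

lemma pvNoPunct (d : Char) (hd : 97 ≤ d.toNat) :
    d ∉ (['!', '?', '\'', ',', ';', '.'] : List Char) := by
  intro hm
  fin_cases hm <;> exact absurd hd (by decide)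

lemma pvF_of_not_break {c : Char} (h : c ∉ pvBreaks) :
    pvF c = PySem.Chars.lowerChar c ∧ PySem.Chars.lowerChar c ≠ ' ' := by
  by_cases hu : PySem.Chars.isupper c = true
  · have hA : 'A' ≤ c ∧ c ≤ 'Z' := by
      simpa [PySem.Chars.isupper] using hu
    have h1 : 65 ≤ c.toNat := hA.1
    have h2 : c.toNat ≤ 90 := hA.2
    have hv : (c.toNat + 32).isValidChar := by left; omega
    have hval : (Char.ofNat (c.toNat + 32)).toNat = c.toNat + 32 := by simp [Char.ofNat, hv]
    have hl : PySem.Chars.lowerChar c = Char.ofNat (c.toNat + 32) := by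
      simp [PySem.Chars.lowerChar, hu]
    have hd : 97 ≤ (Char.ofNat (c.toNat + 32)).toNat := by rw [hval]; omega
    constructor
    · rw [pvF, hl]
      unfold pvTable
      exact if_neg (pvNoPunct _ hd)
    · rw [hl]
      intro he
      rw [he] at hd
      exact absurd hd (by decide)
  · have hl : PySem.Chars.lowerChar c = c := by simp [PySem.Chars.lowerChar, hu]
    simp only [pvBreaks, List.mem_cons, List.not_mem_nil, or_false, not_or] at h
    refine ⟨?_, by rw [hl]; exact h.2.2.2.2.2.2⟩
    rw [pvF, hl]
    unfold pvTable
    rw [if_neg]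
    simp only [List.mem_cons, List.not_mem_nil, or_false, not_or]
    exact ⟨h.1, h.2.1, h.2.2.1, h.2.2.2.1, h.2.2.2.2.1, h.2.2.2.2.2.1⟩

lemma pvGo_single : ∀ (fuel : Nat) (l cur : List Char) (acc : List (List Char)),
    l.length ≤ fuel →
    PySem.Chars.splitOn.go [' '] fuel l cur acc = acc.reverse ++ pvSplit cur.reverse l := by
  intro fuel
  induction fuel with
  | zero =>
    intro l cur acc h
    have hl : l = [] := by cases l <;> simp_all
    subst hl
    simp [PySem.Chars.splitOn.go, pvSplit]
  | succ fuel ih =>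
    intro l cur acc h
    cases l with
    | nil => simp [PySem.Chars.splitOn.go, pvSplit]
    | cons c rest =>
      by_cases hc : c = ' '
      · subst hc
        rw [show PySem.Chars.splitOn.go [' '] (fuel + 1) (' ' :: rest) cur acc
              = PySem.Chars.splitOn.go [' '] fuel rest [] (cur.reverse :: acc) from by
            simp [PySem.Chars.splitOn.go, List.isPrefixOf]]
        rw [ih rest [] (cur.reverse :: acc) (by simpa using Nat.le_of_succ_le_succ h)]
        simp [pvSplit]
      · rw [show PySem.Chars.splitOn.go [' '] (fuel + 1) (c :: rest) cur acc
              = PySem.Chars.splitOn.go [' '] fuel rest (c :: cur) acc from by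
            have hcc : (' ' == c) = false := by simp; exact fun h' => hc h'.symm
            simp [PySem.Chars.splitOn.go, List.isPrefixOf, hcc]]
        rw [ih rest (c :: cur) acc (by simpa using Nat.le_of_succ_le_succ h)]
        simp [pvSplit, hc]

lemma pvSplitOn_single (s : List Char) : PySem.Chars.splitOn s [' '] = pvSplit [] s := by
  unfold PySem.Chars.splitOn
  rw [pvGo_single (s.length + 1) s [] [] (by omega)]
  simp

lemma pvLoop (b : List String) : ∀ (cs : List Char) (acc : List String) (w : List Char),
    pvFinish b (cs.foldl (pvStep b) (acc, w)) =
      acc ++ ((pvSplit w (cs.map pvF)).filter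
        (fun t => decide (t ≠ [] ∧ String.ofList t ∉ b))).map String.ofList := by
  intro cs
  induction cs with
  | nil =>
    intro acc w
    simp only [List.foldl_nil, List.map_nil, pvSplit, pvFinish, List.filter_cons,
      List.filter_nil]
    by_cases hk : w ≠ [] ∧ String.ofList w ∉ b
    · rw [if_pos ⟨List.length_pos_iff.mpr hk.1, hk.2⟩, if_pos (by simpa using hk)]
      simp
    · rw [if_neg (fun hx => hk ⟨List.length_pos_iff.mp hx.1, hx.2⟩), if_neg (by simpa using hk)]
      simp
  | cons c cs ih =>
    intro acc w
    rw [List.foldl_cons]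
    by_cases hc : c ∈ pvBreaks
    · have hf : pvF c = ' ' := pvF_of_break hc
      rw [show pvStep b (acc, w) c
            = ((if String.ofList w ∉ b then
                  (if w.length > 0 then acc ++ [String.ofList w] else acc)
                else acc), ([] : List Char)) from by simp [pvStep, hc]]
      rw [ih _ []]
      simp only [List.map_cons, hf]
      rw [show pvSplit w (' ' :: cs.map pvF) = w :: pvSplit [] (cs.map pvF) from by
            simp [pvSplit]]
      rw [List.filter_cons]
      by_cases hk : w ≠ [] ∧ String.ofList w ∉ b
      · rw [if_pos hk.2, if_pos (List.length_pos_iff.mpr hk.1)]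
        rw [if_pos (show decide (w ≠ [] ∧ String.ofList w ∉ b) = true by simpa using hk)]
        simp
      · have hite : (if String.ofList w ∉ b then
            (if w.length > 0 then acc ++ [String.ofList w] else acc) else acc) = acc := by
          by_cases hb : String.ofList w ∉ b
          · rw [if_pos hb, if_neg]
            intro hx
            exact hk ⟨List.length_pos_iff.mp hx, hb⟩
          · rw [if_neg hb]
        rw [hite, if_neg (by simpa using hk)]
    · obtain ⟨hf, hne⟩ := pvF_of_not_break hc
      rw [show pvStep b (acc, w) c = (acc, w ++ [PySem.Chars.lowerChar c]) from by
            simp [pvStep, hc, PySem.Chars.lower]]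
      rw [ih _ _]
      simp only [List.map_cons, hf]
      rw [show pvSplit w (PySem.Chars.lowerChar c :: cs.map pvF)
            = pvSplit (w ++ [PySem.Chars.lowerChar c]) (cs.map pvF) from by
            simp [pvSplit, hne]]

-- ===== VERDICT (by name: the statement is the Claim_ definition above) =====
theorem clean_paragraph_spec : Claim_equal_clean_paragraph := by
  intro p b _
  unfold Spec_clean_paragraph
  have hB : clean_paragraph_alt p b =
      ((pvSplit [] (p.toList.map pvF)).filter
        (fun t => decide (t ≠ [] ∧ String.ofList t ∉ b))).map String.ofList := by
    unfold clean_paragraph_alt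
    rw [show (PySem.Chars.lower p.toList).map pvTable = p.toList.map pvF from by
          simp [PySem.Chars.lower, List.map_map, pvF, Function.comp]]
    rw [pvSplitOn_single]
  rw [pvA_eq, hB, pvLoop b p.toList [] []]
  simp
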